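-- pv_equiv track=rewrite | github.com/naveenkothas/ignite25-agent-contest | agents/crisis_manager/main.py | _classify_crisis_type
-- ===== SOURCE A (Python) =====
-- def _classify_crisis_type(description: str) -> str:
--     """Classify the type of crisis"""
--     description_lower = description.lower()
--
--     if any(word in description_lower for word in ["bug", "error", "crash", "system"]):
--         return "technical_failure"
--     elif any(word in description_lower for word in ["supply", "vendor", "delivery"]):
--         return "supply_chain"
--     elif any(word in description_lower for word in ["marketing", "message", "campaign"]):
--         return "marketing_issue"
--     elif any(word in description_lower for word in ["security", "breach", "hack"]):
--         return "security_breach"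
--     elif any(word in description_lower for word in ["quality", "defect", "broken"]):
--         return "quality_defect"
--     else:
--         return "general_crisis"
-- ===== SOURCE B (Python) =====
-- _NAMES = ["technical_failure", "supply_chain", "marketing_issue",
--           "security_breach", "quality_defect"]
--
-- _KEYWORDS = [
--     ("bug", 0), ("error", 0), ("crash", 0), ("system", 0),
--     ("supply", 1), ("vendor", 1), ("delivery", 1),
--     ("marketing", 2), ("message", 2), ("campaign", 2),
--     ("security", 3), ("breach", 3), ("hack", 3),
--     ("quality", 4), ("defect", 4), ("broken", 4),
-- ]
--
--
-- def _classify_crisis_type(description: str) -> str: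
--     """Single left-to-right scan of the text: at each position, record the
--     best (lowest) priority of any keyword starting there; the category with
--     the minimum priority wins, 'general_crisis' if nothing matched."""
--     s = description.lower()
--     best = 5
--     for i in range(len(s)):
--         for kw, pr in _KEYWORDS:
--             if s.startswith(kw, i):
--                 best = min(best, pr)
--     return _NAMES[best] if best < 5 else "general_crisis"
-- ===== Notes on version B (the rewrite author's own statement) =====
-- stated objective: alternative
-- what changed: Replaces A's five-way if/elif chain of whole-string substring tests by one left-to-right scan of the text that, at every position, records the minimum priority of any keyword starting there, then maps the minimum matched priority to its category.
import Mathlib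
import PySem

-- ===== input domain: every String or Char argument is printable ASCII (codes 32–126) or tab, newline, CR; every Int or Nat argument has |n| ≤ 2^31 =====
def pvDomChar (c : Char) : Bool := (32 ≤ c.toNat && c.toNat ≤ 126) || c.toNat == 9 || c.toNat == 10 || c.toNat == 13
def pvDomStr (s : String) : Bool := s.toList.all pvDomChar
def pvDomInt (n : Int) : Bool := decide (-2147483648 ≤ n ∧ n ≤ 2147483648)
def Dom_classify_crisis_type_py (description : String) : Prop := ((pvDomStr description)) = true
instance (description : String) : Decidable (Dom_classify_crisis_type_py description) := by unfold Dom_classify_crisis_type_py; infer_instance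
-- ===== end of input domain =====

-- B replaces A's five-way branch chain of substring tests by a single left-to-right scan of the
-- text that keeps the minimum priority of any keyword starting at each position (alternative).

-- ===== PORT A =====
-- literal transliteration of the if/elif chain
def classify_crisis_type_py (description : String) : String :=
  let description_lower := PySem.Str.lower description
  if (["bug", "error", "crash", "system"].any fun word => PySem.Str.isIn word description_lower) then
    "technical_failure"
  else if (["supply", "vendor", "delivery"].any fun word => PySem.Str.isIn word description_lower) then
    "supply_chain"
  else if (["marketing", "message", "campaign"].any fun word => PySem.Str.isIn word description_lower) then
    "marketing_issue"
  else if (["security", "breach", "hack"].any fun word => PySem.Str.isIn word description_lower) then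
    "security_breach"
  else if (["quality", "defect", "broken"].any fun word => PySem.Str.isIn word description_lower) then
    "quality_defect"
  else
    "general_crisis"

-- ===== PORT B =====
-- _NAMES
def pvNames : List String :=
  ["technical_failure", "supply_chain", "marketing_issue", "security_breach", "quality_defect"]

-- _KEYWORDS: flat (keyword, priority) table
def pvKeywords : List (List Char × Nat) :=
  [("bug".toList, 0), ("error".toList, 0), ("crash".toList, 0), ("system".toList, 0),
   ("supply".toList, 1), ("vendor".toList, 1), ("delivery".toList, 1),
   ("marketing".toList, 2), ("message".toList, 2), ("campaign".toList, 2),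
   ("security".toList, 3), ("breach".toList, 3), ("hack".toList, 3),
   ("quality".toList, 4), ("defect".toList, 4), ("broken".toList, 4)]

-- inner 'for kw, pr in _KEYWORDS: if s.startswith(kw, i): best = min(best, pr)';
-- Python's s.startswith(kw, i) with 0 ≤ i ≤ len(s) is exactly the prefix test on s[i:] (here: suff)
def pvInner (suff : List Char) (best : Nat) : Nat :=
  pvKeywords.foldl (fun b kv => if PySem.Chars.startswith suff kv.1 then min b kv.2 else b) best

def classify_crisis_type_py_alt (description : String) : String :=
  let s := (PySem.Str.lower description).toList
  -- 'for i in range(len(s))': len(s) ≥ 0, so range(len(s)) is exactly List.range s.length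
  let best := (List.range s.length).foldl (fun b i => pvInner (s.drop i) b) 5
  if best < 5 then pvNames.getD best "general_crisis" else "general_crisis"

-- ===== PRECONDITION & SPEC =====
def Spec_classify_crisis_type_py (description : String) (out : String) : Prop := out = classify_crisis_type_py_alt description
instance (description : String) (out : String) : Decidable (Spec_classify_crisis_type_py description out) := by unfold Spec_classify_crisis_type_py; infer_instance

-- ===== CLAIM (what is proved, stated in full; the proofs are below) =====
def Claim_equal_classify_crisis_type_py : Prop := ∀ (description : String), Dom_classify_crisis_type_py description → Spec_classify_crisis_type_py description (classify_crisis_type_py description)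

-- ===== LEMMAS AND PROOFS =====

-- the five keyword groups, in A's priority order
def pvW0 : List (List Char) := ["bug".toList, "error".toList, "crash".toList, "system".toList]
def pvW1 : List (List Char) := ["supply".toList, "vendor".toList, "delivery".toList]
def pvW2 : List (List Char) := ["marketing".toList, "message".toList, "campaign".toList]
def pvW3 : List (List Char) := ["security".toList, "breach".toList, "hack".toList]
def pvW4 : List (List Char) := ["quality".toList, "defect".toList, "broken".toList]

-- does some word of ws occur as a substring of l?
def pvA (ws : List (List Char)) (l : List Char) : Bool :=
  ws.any fun kw => PySem.Chars.isIn kw l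

-- does some word of ws start at the head of l?
def pvS (ws : List (List Char)) (l : List Char) : Bool :=
  ws.any fun kw => PySem.Chars.startswith l kw

-- the priority A's elif chain selects (5 = no match)
def pvR (l : List Char) : Nat :=
  if pvA pvW0 l then 0 else if pvA pvW1 l then 1 else if pvA pvW2 l then 2
  else if pvA pvW3 l then 3 else if pvA pvW4 l then 4 else 5

-- B's outer loop, rephrased as structural recursion over the suffixes of l
def pvScanS (l : List Char) (best : Nat) : Nat :=
  match l with
  | [] => best
  | _ :: t => pvScanS t (pvInner l best)

theorem pvKeywords_eq : pvKeywords =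
    pvW0.map (fun kw => (kw, 0)) ++ pvW1.map (fun kw => (kw, 1)) ++ pvW2.map (fun kw => (kw, 2))
      ++ pvW3.map (fun kw => (kw, 3)) ++ pvW4.map (fun kw => (kw, 4)) := rfl

-- fold of one constant-priority group collapses to a single conditional min
theorem pvFoldGroup (ws : List (List Char)) (p : Nat) (l : List Char) (b : Nat) :
    (ws.map (fun kw => (kw, p))).foldl
        (fun b kv => if PySem.Chars.startswith l kv.1 then min b kv.2 else b) b =
      if pvS ws l then min b p else b := by
  induction ws generalizing b with
  | nil => simp [pvS]
  | cons kw rest ih =>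
    by_cases h : PySem.Chars.startswith l kw
    · simp [pvS, h, ih, List.any_cons]
    · simp [pvS, h, ih, List.any_cons]

-- the inner loop = the five group conditionals chained
theorem pvInner_eq (l : List Char) (b : Nat) :
    pvInner l b =
      (fun b => if pvS pvW4 l then min b 4 else b)
        ((fun b => if pvS pvW3 l then min b 3 else b)
          ((fun b => if pvS pvW2 l then min b 2 else b)
            ((fun b => if pvS pvW1 l then min b 1 else b)
              ((fun b => if pvS pvW0 l then min b 0 else b) b)))) := by
  rw [pvInner, pvKeywords_eq]
  simp only [List.foldl_append, pvFoldGroup]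

theorem pvInner_le (l : List Char) (b : Nat) : pvInner l b ≤ b := by
  rw [pvInner_eq]
  dsimp only
  split_ifs <;> omega

-- substring of (c :: t) = prefix of (c :: t) or substring of t, lifted over a word group
theorem pvA_cons (ws : List (List Char)) (c : Char) (t : List Char) :
    pvA ws (c :: t) = (pvS ws (c :: t) || pvA ws t) := by
  rw [Bool.eq_iff_iff]
  simp only [pvA, pvS, List.any_eq_true, Bool.or_eq_true,
    PySem.Chars.isIn_iff_infix, PySem.Chars.startswith_iff, List.infix_cons_iff]
  constructor
  · rintro ⟨x, hx, h | h⟩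
    exacts [Or.inl ⟨x, hx, h⟩, Or.inr ⟨x, hx, h⟩]
  · rintro (⟨x, hx, h⟩ | ⟨x, hx, h⟩)
    exacts [⟨x, hx, Or.inl h⟩, ⟨x, hx, Or.inr h⟩]

-- pure boolean/arithmetic core of the loop invariant
theorem pvKey (best : Nat) (h : best ≤ 5) :
    ∀ s0 s1 s2 s3 s4 a0 a1 a2 a3 a4 : Bool,
      min
        ((fun b => if s4 then min b 4 else b)
          ((fun b => if s3 then min b 3 else b)
            ((fun b => if s2 then min b 2 else b)
              ((fun b => if s1 then min b 1 else b)
                ((fun b => if s0 then min b 0 else b) best)))))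
        (if a0 then 0 else if a1 then 1 else if a2 then 2 else if a3 then 3 else if a4 then 4 else 5)
      = min best
        (if (s0 || a0) then 0 else if (s1 || a1) then 1 else if (s2 || a2) then 2
         else if (s3 || a3) then 3 else if (s4 || a4) then 4 else 5) := by
  interval_cases best <;> decide

-- main invariant: the scan computes the minimum of its accumulator and A's selected priority
theorem pvScanS_eq (l : List Char) : ∀ best : Nat, best ≤ 5 →
    pvScanS l best = min best (pvR l) := by
  induction l with
  | nil =>
    intro best h
    have h5 : pvR [] = 5 := by decide
    simp [pvScanS, h5]
    omega
  | cons c t ih =>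
    intro best h
    have hinner : pvInner (c :: t) best ≤ 5 := le_trans (pvInner_le _ _) h
    rw [pvScanS, ih _ hinner, pvInner_eq, pvR, pvR,
      pvA_cons pvW0, pvA_cons pvW1, pvA_cons pvW2, pvA_cons pvW3, pvA_cons pvW4]
    exact pvKey best h _ _ _ _ _ _ _ _ _ _

-- B's index loop over range(len(s)) visits exactly the suffixes of s, head first
theorem pvFoldRange_eq_scanS (l : List Char) : ∀ best : Nat,
    (List.range l.length).foldl (fun b i => pvInner (l.drop i) b) best = pvScanS l best := by
  induction l with
  | nil => intro best; simp [pvScanS]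
  | cons c t ih =>
    intro best
    rw [List.length_cons, List.range_succ_eq_map, List.foldl_cons, List.foldl_map]
    simpa [pvScanS] using ih (pvInner (c :: t) best)

theorem pvR_le (l : List Char) : pvR l ≤ 5 := by
  rw [pvR]; split_ifs <;> omega

-- ===== VERDICT (by name: the statement is the Claim_ definition above) =====
theorem classify_crisis_type_py_spec : Claim_equal_classify_crisis_type_py := by
  intro description _
  unfold Spec_classify_crisis_type_py
  rw [classify_crisis_type_py_alt]
  rw [pvFoldRange_eq_scanS, pvScanS_eq _ 5 (le_refl 5)]
  rw [classify_crisis_type_py]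
  simp only [List.any_cons, List.any_nil, PySem.Str.isIn_eq, PySem.Str.toList_lower]
  have h5 : min 5 (pvR (PySem.Chars.lower description.toList)) =
      pvR (PySem.Chars.lower description.toList) := by
    have := pvR_le (PySem.Chars.lower description.toList)
    omega
  rw [h5, pvR]
  simp only [pvA, pvW0, pvW1, pvW2, pvW3, pvW4, List.any_cons, List.any_nil]
  split_ifs <;> simp_all [pvNames]
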